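-- pv_equiv track=rewrite | github.com/Ismail-Hossain-1/Course_INS-Lab | Lab-manual-2/checkpoint 2_1.py | break_substitution_cipher
-- ===== SOURCE A (Python) =====
-- def break_substitution_cipher(cipher):
--     # Count letter frequencies
--     frequency = {}
--     for char in cipher.lower():
--         if 'a' <= char <= 'z':
--             frequency[char] = frequency.get(char, 0) + 1
--
--     # Sort by frequency (descending)
--     sorted_frequency = sorted(frequency.items(), key=lambda x: x[1], reverse=True)
--     common_letters = [entry[0] for entry in sorted_frequency]
--
--     # English letter frequency (most common to least)
--     english_frequency = list('eotainshrdlcufwmpygbkqvjxz')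
--
--     # Map cipher letters to guessed English letters
--     mapping = {common_letters[i]: english_frequency[i] for i in range(len(common_letters))}
--
--     # Decrypt text
--     decrypted = ''
--     for char in cipher:
--         if 'a' <= char <= 'z':
--             decrypted += mapping.get(char, char)
--         elif 'A' <= char <= 'Z':
--             lower = char.lower()
--             decrypted += mapping.get(lower, lower).upper()
--         else:
--             decrypted += char
--
--     return decrypted
-- ===== SOURCE B (Python) =====
-- def break_substitution_cipher(cipher):
--     # Rank-by-comparison instead of sorting: each letter's target is determined
--     # directly by counting how many letters beat it under (count desc, first
--     # occurrence asc) -- the exact order of a stable descending frequency sort.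
--     eng = 'eotainshrdlcufwmpygbkqvjxz'
--     lo = cipher.lower()
--     letters = [c for c in lo if 'a' <= c <= 'z']
--
--     def key(c):
--         return (-letters.count(c), letters.index(c))
--
--     present = set(letters)
--     sub = {c: eng[sum(1 for d in present if key(d) < key(c))] for c in present}
--
--     out = []
--     for ch in cipher:
--         cl = ch.lower()
--         if cl in sub:
--             out.append(sub[cl] if ch == cl else sub[cl].upper())
--         else:
--             out.append(ch)
--     return ''.join(out)
-- ===== Notes on version B (the rewrite author's own statement) =====
-- stated objective: alternative
-- what changed: B eliminates A's counting dict and stable sort entirely: each present letter's English target is computed directly as eng[rank], where rank counts the letters that beat it under the lexicographic key (count descending, first occurrence ascending) -- rank-by-pairwise-comparison (selection rank) instead of sort-then-zip -- and decoding branches on ch == ch.lower() against one lowercase-keyed table instead of A's three-way range test.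
import Mathlib
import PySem

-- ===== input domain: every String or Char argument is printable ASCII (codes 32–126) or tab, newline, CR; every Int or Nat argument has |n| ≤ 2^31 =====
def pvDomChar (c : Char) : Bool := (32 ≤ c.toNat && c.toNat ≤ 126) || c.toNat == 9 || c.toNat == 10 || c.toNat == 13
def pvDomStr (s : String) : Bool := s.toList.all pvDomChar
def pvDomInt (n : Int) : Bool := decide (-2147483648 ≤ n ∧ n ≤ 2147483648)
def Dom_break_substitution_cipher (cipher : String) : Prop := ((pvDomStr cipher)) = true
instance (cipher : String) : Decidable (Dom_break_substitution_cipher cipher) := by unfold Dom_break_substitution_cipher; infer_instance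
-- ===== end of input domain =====

-- B replaces A's count-dict + stable sort + zip by direct rank computation: each
-- present letter maps to eng[rank], rank = how many letters beat it under
-- (count desc, first occurrence asc); decode branches on ch == ch.lower()
-- (objective: alternative; same result, genuinely different algorithm).

-- ===== PORT A =====
-- frequency = {}; for char in cipher.lower(): if 'a' <= char <= 'z': frequency[char] = frequency.get(char, 0) + 1
def pvFreqA (cs : List Char) : PySem.Dict Char Int :=
  cs.foldl
    (fun d c => if decide ('a' ≤ c) && decide (c ≤ 'z') then d.insert c (d.getD c 0 + 1) else d)
    PySem.Dict.empty

-- mapping = {common_letters[i]: english_frequency[i] for i in range(len(common_letters))}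
-- (pyGet? = Python indexing; the `none` branch is Python's IndexError, unreachable: i < len(common_letters) ≤ 26)
def pvIndexInsert (common eng : List Char) (d : PySem.Dict Char Char) (i : Int) : PySem.Dict Char Char :=
  match PySem.List.pyGet? common i, PySem.List.pyGet? eng i with
  | some k, some v => d.insert k v
  | _, _ => d

def pvMapA (common eng : List Char) : PySem.Dict Char Char :=
  (PySem.List.pyRange 0 (common.length : Int) 1).foldl (pvIndexInsert common eng) PySem.Dict.empty

-- decrypted = ''; for char in cipher: if/elif/else branches, each appending one character
def pvDecA (m : PySem.Dict Char Char) (cs : List Char) : List Char :=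
  cs.foldl
    (fun acc c =>
      if decide ('a' ≤ c) && decide (c ≤ 'z') then acc ++ [m.getD c c]
      else if decide ('A' ≤ c) && decide (c ≤ 'Z') then
        acc ++ [PySem.Chars.upperChar (m.getD (PySem.Chars.lowerChar c) (PySem.Chars.lowerChar c))]
      else acc ++ [c])
    []

def break_substitution_cipher (cipher : String) : String :=
  let frequency := pvFreqA (PySem.Str.lower cipher).toList
  let sorted_frequency := PySem.List.sorted frequency.items (fun x => x.2) true
  let common_letters := sorted_frequency.map (fun e => e.1)
  let english_frequency := "eotainshrdlcufwmpygbkqvjxz".toList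
  let mapping := pvMapA common_letters english_frequency
  String.mk (pvDecA mapping cipher.toList)

-- ===== PORT B =====
-- key(d) < key(c) where key(c) = (-letters.count(c), letters.index(c)) — Python tuple '<'
-- written out lexicographically; letters.index is only evaluated on letters that occur
-- in `letters`, where List.idxOf is exactly Python's first-occurrence index.
def pvKeyLtB (letters : List Char) (d c : Char) : Bool :=
  decide ((-(letters.count d : Int)) < -(letters.count c : Int)) ||
    (decide ((-(letters.count d : Int)) = -(letters.count c : Int)) &&
      decide (letters.idxOf d < letters.idxOf c))

-- sum(1 for d in present if key(d) < key(c))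
def pvRankB (letters present : List Char) (c : Char) : Nat :=
  present.countP (fun d => pvKeyLtB letters d c)

-- sub = {c: eng[rank(c)] for c in present}; eng[r] via pyGet? (none = IndexError,
-- unreachable: rank < len(present) ≤ 26 = len(eng))
def pvSubB (letters present eng : List Char) : PySem.Dict Char Char :=
  present.foldl
    (fun d c =>
      match PySem.List.pyGet? eng ((pvRankB letters present c : Nat) : Int) with
      | some e => d.insert c e
      | none => d)
    PySem.Dict.empty

-- for ch in cipher: cl = ch.lower(); if cl in sub: out.append(sub[cl] if ch == cl else sub[cl].upper()) else: out.append(ch)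
def pvDecB (sub : PySem.Dict Char Char) (cs : List Char) : List Char :=
  cs.foldl
    (fun acc ch =>
      match sub.get? (PySem.Chars.lowerChar ch) with
      | some e => acc ++ [if ch = PySem.Chars.lowerChar ch then e else PySem.Chars.upperChar e]
      | none => acc ++ [ch])
    []

def break_substitution_cipher_alt (cipher : String) : String :=
  let lo := PySem.Str.lower cipher
  let letters := lo.toList.filter (fun c => decide ('a' ≤ c) && decide (c ≤ 'z'))
  let present := PySem.Set.ofList letters
  let sub := pvSubB letters present "eotainshrdlcufwmpygbkqvjxz".toList
  String.mk (pvDecB sub cipher.toList)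

-- ===== PRECONDITION & SPEC =====
def Spec_break_substitution_cipher (cipher : String) (out : String) : Prop := out = break_substitution_cipher_alt cipher
instance (cipher : String) (out : String) : Decidable (Spec_break_substitution_cipher cipher out) := by unfold Spec_break_substitution_cipher; infer_instance

-- ===== CLAIM (what is proved, stated in full; the proofs are below) =====
def Claim_equal_break_substitution_cipher : Prop := ∀ (cipher : String), Dom_break_substitution_cipher cipher → Spec_break_substitution_cipher cipher (break_substitution_cipher cipher)

-- ===== LEMMAS AND PROOFS =====

-- A's sort key and B's comparison, as a Prop (count desc, first occurrence asc)
def pvKey (letters : List Char) (c : Char) : Int := -(letters.count c : Int)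
def pvLt (letters : List Char) (d c : Char) : Prop :=
  pvKey letters d < pvKey letters c ∨
    (pvKey letters d = pvKey letters c ∧ letters.idxOf d < letters.idxOf c)

theorem keyLtB_iff (letters : List Char) (d c : Char) :
    pvKeyLtB letters d c = true ↔ pvLt letters d c := by
  simp only [pvKeyLtB, Bool.or_eq_true, Bool.and_eq_true, decide_eq_true_eq, pvLt, pvKey]

theorem pvLt_irrefl (letters : List Char) (c : Char) : ¬ pvLt letters c c := by
  simp [pvLt]

theorem pvLt_asymm (letters : List Char) {d c : Char} (h : pvLt letters d c) :
    ¬ pvLt letters c d := by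
  rcases h with h | ⟨h1, h2⟩ <;> rintro (h' | ⟨h1', h2'⟩) <;> omega

theorem pvLt_le (letters : List Char) {d c : Char} (h : pvLt letters d c) :
    pvKey letters d ≤ pvKey letters c := by
  rcases h with h | ⟨h1, _⟩ <;> omega

-- inserting x into a pvLt-pairwise list keeps it pairwise, provided every element
-- already present occurs earlier in `letters` (stability of insertBy)
theorem pairwise_insertBy_stable (letters : List Char) (x : Char) :
    ∀ (S : List Char), S.Pairwise (pvLt letters) →
    (∀ a ∈ S, letters.idxOf a < letters.idxOf x) →
    (PySem.List.insertBy (fun a b => decide (pvKey letters a < pvKey letters b)) x S).Pairwise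
      (pvLt letters) := by
  intro S
  induction S with
  | nil => intro _ _; simp [PySem.List.insertBy]
  | cons y T ih =>
    intro hp hidx
    rw [PySem.List.insertBy]
    by_cases hxy : pvKey letters x < pvKey letters y
    · rw [if_pos (by simpa using hxy)]
      rw [List.pairwise_cons]
      refine ⟨?_, hp⟩
      intro z hz
      rcases List.mem_cons.mp hz with rfl | hz
      · exact Or.inl hxy
      · have hyz := (List.pairwise_cons.mp hp).1 z hz
        exact Or.inl (lt_of_lt_of_le hxy (pvLt_le letters hyz))
    · rw [if_neg (by simpa using hxy)]
      rw [List.pairwise_cons]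
      constructor
      · intro z hz
        rcases (PySem.List.mem_insertBy _ _ _ _).mp hz with rfl | hz
        · push_neg at hxy
          rcases lt_or_eq_of_le hxy with h | h
          · exact Or.inl h
          · exact Or.inr ⟨h, hidx y (by simp)⟩
        · exact (List.pairwise_cons.mp hp).1 z hz
      · exact ih (List.pairwise_cons.mp hp).2 (fun a ha => hidx a (by simp [ha]))

theorem pairwise_foldl_insertBy_stable (letters : List Char) :
    ∀ (P acc : List Char), P.Pairwise (fun a b => letters.idxOf a < letters.idxOf b) →
    (∀ a ∈ acc, ∀ x ∈ P, letters.idxOf a < letters.idxOf x) →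
    acc.Pairwise (pvLt letters) →
    (P.foldl
      (fun acc x => PySem.List.insertBy (fun a b => decide (pvKey letters a < pvKey letters b)) x acc)
      acc).Pairwise (pvLt letters) := by
  intro P
  induction P with
  | nil => intro acc _ _ h; exact h
  | cons x P' ih =>
    intro acc hP hinv hacc
    simp only [List.foldl_cons]
    apply ih
    · exact (List.pairwise_cons.mp hP).2
    · intro a ha y hy
      rcases (PySem.List.mem_insertBy _ _ _ _).mp ha with rfl | ha
      · exact (List.pairwise_cons.mp hP).1 y hy
      · exact hinv a ha y (by simp [hy])
    · exact pairwise_insertBy_stable letters x acc hacc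
        (fun a ha => hinv a ha x (by simp))

-- set(xs) lists elements in first-occurrence order
theorem ofList_pairwise_idx (xs : List Char) :
    (PySem.Set.ofList xs).Pairwise (fun a b => xs.idxOf a < xs.idxOf b) := by
  induction xs using List.reverseRecOn with
  | nil => simp [PySem.Set.ofList]
  | append_singleton xs x ih =>
    have hof : PySem.Set.ofList (xs ++ [x]) = PySem.Set.add (PySem.Set.ofList xs) x := by
      rw [PySem.Set.ofList_eq_foldl, PySem.Set.ofList_eq_foldl, List.foldl_append]
      rfl
    have hmemD : ∀ a, a ∈ PySem.Set.ofList xs → a ∈ xs := by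
      intro a ha; exact (PySem.Set.mem_ofList _ _).mp ha
    have hidx_mem : ∀ a ∈ xs, (xs ++ [x]).idxOf a = xs.idxOf a := by
      intro a ha
      exact List.idxOf_append_of_mem ha
    by_cases hx : x ∈ PySem.Set.ofList xs
    · rw [hof, PySem.Set.add_of_mem hx]
      refine ih.imp_of_mem ?_
      intro a b ha hb h
      rw [hidx_mem a (hmemD a ha), hidx_mem b (hmemD b hb)]
      exact h
    · rw [hof, PySem.Set.add_of_not_mem hx]
      have hxxs : x ∉ xs := fun h => hx ((PySem.Set.mem_ofList _ _).mpr h)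
      rw [List.pairwise_append]
      refine ⟨ih.imp_of_mem ?_, by simp, ?_⟩
      · intro a b ha hb h
        rw [hidx_mem a (hmemD a ha), hidx_mem b (hmemD b hb)]
        exact h
      · intro a ha b hb
        rw [List.mem_singleton] at hb
        have h1 : xs.idxOf a < xs.length := List.idxOf_lt_length_of_mem (hmemD a ha)
        have h2 : (xs ++ [x]).idxOf b = xs.length := by
          rw [hb, List.idxOf_append_of_notMem hxxs]
          simp
        rw [hidx_mem a (hmemD a ha), h2]
        omega

-- in a pvLt-pairwise duplicate-free list, an element's index equals the number of
-- elements that beat it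
theorem idxOf_eq_countP (letters : List Char) :
    ∀ (S : List Char), S.Nodup → S.Pairwise (pvLt letters) → ∀ c ∈ S,
    S.idxOf c = S.countP (fun d => pvKeyLtB letters d c) := by
  intro S
  induction S with
  | nil => intro _ _ c hc; simp at hc
  | cons y T ih =>
    intro hnd hp c hc
    rcases List.mem_cons.mp hc with rfl | hc
    · rw [List.idxOf_cons_self]
      have h0 : ∀ d ∈ T, ¬ pvLt letters d c :=
        fun d hd => pvLt_asymm letters ((List.pairwise_cons.mp hp).1 d hd)
      rw [List.countP_cons]
      have h1 : T.countP (fun d => pvKeyLtB letters d c) = 0 := by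
        rw [List.countP_eq_zero]
        intro d hd
        rw [keyLtB_iff]
        exact h0 d hd
      have hcc : pvKeyLtB letters c c = false := by
        rw [← Bool.not_eq_true, keyLtB_iff]
        exact pvLt_irrefl letters c
      simp [h1, hcc]
    · have hne : y ≠ c := fun h => (List.nodup_cons.mp hnd).1 (h ▸ hc)
      rw [List.idxOf_cons_ne _ (by exact hne), List.countP_cons]
      have hyc : pvKeyLtB letters y c = true := (keyLtB_iff letters y c).mpr ((List.pairwise_cons.mp hp).1 c hc)
      simp only [hyc, if_true]
      rw [ih (List.nodup_cons.mp hnd).2 (List.pairwise_cons.mp hp).2 c hc]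

-- find? over a zipped mapping list reads off the element at the index
theorem find?_zip_eq (c : Char) :
    ∀ (S eng : List Char), S.Nodup → c ∈ S → S.idxOf c < eng.length →
    ((S.zip eng).find? (fun p => p.1 == c)).map Prod.snd = eng[S.idxOf c]? := by
  intro S
  induction S with
  | nil => intro eng _ hc; simp at hc
  | cons s S' ih =>
    intro eng hnd hc hlen
    cases eng with
    | nil => simp at hlen
    | cons e E' =>
      by_cases hsc : s = c
      · subst hsc
        simp [List.find?_cons_of_pos]
      · rw [List.idxOf_cons_ne _ (by exact hsc)] at hlen ⊢
        have hcS' : c ∈ S' := by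
          rcases List.mem_cons.mp hc with rfl | h
          · exact absurd rfl hsc
          · exact h
        simp only [List.zip_cons_cons]
        rw [List.find?_cons_of_neg (by simpa using hsc)]
        rw [ih E' (List.nodup_cons.mp hnd).2 hcS' (by simpa using hlen)]
        simp

theorem find?_zip_none (c : Char) (S eng : List Char) (hc : c ∉ S) :
    (S.zip eng).find? (fun p => p.1 == c) = none := by
  rw [List.find?_eq_none]
  intro p hp
  have : p.1 ∈ S := (List.of_mem_zip hp).1
  simp only [beq_iff_eq]
  intro h
  exact hc (h ▸ this)

-- (reused from the previous A-side analysis) get? after a fold of inserts over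
-- distinct keys is a find? over the pair list
theorem get?_foldl_insert {κ ν : Type} [BEq κ] [LawfulBEq κ] :
    ∀ (ps : List (κ × ν)) (d : PySem.Dict κ ν) (k : κ),
    (ps.map Prod.fst).Nodup →
    (ps.foldl (fun d p => d.insert p.1 p.2) d).get? k
      = ((ps.find? (fun p => p.1 == k)).map Prod.snd).or (d.get? k) := by
  intro ps
  induction ps with
  | nil => intro d k _; rfl
  | cons p ps ih =>
    intro d k hnd
    simp only [List.map_cons, List.nodup_cons] at hnd
    simp only [List.foldl_cons]
    rw [ih _ k hnd.2]
    by_cases hpk : (p.1 == k) = true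
    · have hk : p.1 = k := by simpa using hpk
      rw [show List.find? (fun q => q.1 == k) (p :: ps) = some p from List.find?_cons_of_pos hpk]
      have hnone : ps.find? (fun q => q.1 == k) = none := by
        rw [List.find?_eq_none]
        intro q hq
        simp only [beq_iff_eq]
        intro hqk
        have hpq : p.1 = q.1 := hk.trans hqk.symm
        exact hnd.1 (by rw [hpq]; exact List.mem_map_of_mem hq)
      rw [hnone, hk]
      simp [PySem.Dict.get?_insert_self]
    · rw [show List.find? (fun q => q.1 == k) (p :: ps) = List.find? (fun q => q.1 == k) ps from
        List.find?_cons_of_neg (by simpa using hpk)]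
      have hne : k ≠ p.1 := fun h => hpk (by simp [h])
      rw [PySem.Dict.get?_insert_of_ne _ _ hne]

-- A's index-loop dict comprehension is a fold of inserts over the zip
theorem pvMapA_eq_zip (L E : List Char) (hLE : L.length ≤ E.length) :
    pvMapA L E = (L.zip E).foldl (fun d p => d.insert p.1 p.2) PySem.Dict.empty := by
  unfold pvMapA
  have key : ∀ n : Nat, n ≤ L.length →
      ((List.range n).map (fun k : Nat => (k : Int))).foldl (pvIndexInsert L E) PySem.Dict.empty
      = ((L.zip E).take n).foldl (fun d p => d.insert p.1 p.2) PySem.Dict.empty := by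
    intro n
    induction n with
    | zero => intro _; rfl
    | succ m ih =>
      intro hm
      have hmL : m < L.length := hm
      have hmE : m < E.length := lt_of_lt_of_le hmL hLE
      have hmz : m < (L.zip E).length := by simp [List.length_zip]; omega
      rw [List.range_succ, List.map_append, List.foldl_append]
      rw [ih (le_of_lt hmL)]
      have h1 : PySem.List.pyGet? L ((m : Nat) : Int) = some L[m] := by
        rw [PySem.List.pyGet?_natCast]
        exact List.getElem?_eq_getElem hmL
      have h2 : PySem.List.pyGet? E ((m : Nat) : Int) = some E[m] := by
        rw [PySem.List.pyGet?_natCast]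
        exact List.getElem?_eq_getElem hmE
      rw [List.take_add_one]
      have h3 : (L.zip E)[m]? = some (L[m], E[m]) := by
        rw [List.getElem?_eq_getElem hmz]
        simp [List.getElem_zip]
      rw [h3]
      simp only [List.map_cons, List.map_nil, List.foldl_cons, List.foldl_nil,
        List.foldl_append, Option.toList_some]
      rw [pvIndexInsert, h1, h2]
  have hr : PySem.List.pyRange 0 (L.length : Int) 1
      = (List.range L.length).map (fun k : Nat => (k : Int)) := by
    rw [PySem.List.pyRange_one]
    simp
  rw [hr]
  have := key L.length le_rfl
  rwa [List.take_of_length_le (by simp [List.length_zip])] at this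

-- ---- character arithmetic helpers ----
theorem char_toNat_injective : Function.Injective Char.toNat := by
  intro a b h
  exact Char.ext (UInt32.toNat_inj.mp h)

theorem toNat_ofNat_valid (n : Nat) (h : n < 55296) : (Char.ofNat n).toNat = n := by
  rw [Char.toNat_ofNat, if_pos]
  exact Or.inl (by omega)

theorem upperChar_toNat {c : Char} (h1 : 97 ≤ c.toNat) (h2 : c.toNat ≤ 122) :
    (PySem.Chars.upperChar c).toNat = c.toNat - 32 := by
  have hl : PySem.Chars.islower c = true := by
    simp only [PySem.Chars.islower, Bool.and_eq_true, decide_eq_true_eq, Char.le_def]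
    constructor
    · exact UInt32.le_iff_toNat_le.mpr (by exact h1)
    · exact UInt32.le_iff_toNat_le.mpr (by exact h2)
  rw [PySem.Chars.upperChar, if_pos hl]
  exact toNat_ofNat_valid _ (by omega)

theorem lowerChar_toNat {c : Char} (h1 : 65 ≤ c.toNat) (h2 : c.toNat ≤ 90) :
    (PySem.Chars.lowerChar c).toNat = c.toNat + 32 := by
  have hl : PySem.Chars.isupper c = true := by
    simp only [PySem.Chars.isupper, Bool.and_eq_true, decide_eq_true_eq, Char.le_def]
    constructor
    · exact UInt32.le_iff_toNat_le.mpr (by exact h1)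
    · exact UInt32.le_iff_toNat_le.mpr (by exact h2)
  rw [PySem.Chars.lowerChar, if_pos hl]
  exact toNat_ofNat_valid _ (by omega)

theorem isupper_iff (c : Char) :
    PySem.Chars.isupper c = true ↔ (65 ≤ c.toNat ∧ c.toNat ≤ 90) := by
  simp only [PySem.Chars.isupper, Bool.and_eq_true, decide_eq_true_eq, Char.le_def,
    UInt32.le_iff_toNat_le]
  constructor <;> exact fun h => ⟨h.1, h.2⟩

theorem lowerChar_eq_self {c : Char} (h : ¬ (65 ≤ c.toNat ∧ c.toNat ≤ 90)) :
    PySem.Chars.lowerChar c = c := by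
  have hu : PySem.Chars.isupper c = false := by
    rw [← Bool.not_eq_true]
    intro htrue
    exact h ((isupper_iff c).mp htrue)
  rw [PySem.Chars.lowerChar, hu]
  simp

theorem lower_bool_iff (c : Char) :
    (decide ('a' ≤ c) && decide (c ≤ 'z')) = true ↔ (97 ≤ c.toNat ∧ c.toNat ≤ 122) := by
  simp only [Bool.and_eq_true, decide_eq_true_eq, Char.le_def, UInt32.le_iff_toNat_le]
  constructor <;> exact fun h => ⟨h.1, h.2⟩

theorem upper_bool_iff (c : Char) :
    (decide ('A' ≤ c) && decide (c ≤ 'Z')) = true ↔ (65 ≤ c.toNat ∧ c.toNat ≤ 90) := by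
  simp only [Bool.and_eq_true, decide_eq_true_eq, Char.le_def, UInt32.le_iff_toNat_le]
  constructor <;> exact fun h => ⟨h.1, h.2⟩

-- ---- the two decode loops as maps ----
def pvCharA (m : PySem.Dict Char Char) (c : Char) : Char :=
  if decide ('a' ≤ c) && decide (c ≤ 'z') then m.getD c c
  else if decide ('A' ≤ c) && decide (c ≤ 'Z') then
    PySem.Chars.upperChar (m.getD (PySem.Chars.lowerChar c) (PySem.Chars.lowerChar c))
  else c

theorem pvDecA_eq_map (m : PySem.Dict Char Char) (cs : List Char) :
    pvDecA m cs = cs.map (pvCharA m) := by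
  unfold pvDecA
  have hbody : (fun (acc : List Char) c =>
      if decide ('a' ≤ c) && decide (c ≤ 'z') then acc ++ [m.getD c c]
      else if decide ('A' ≤ c) && decide (c ≤ 'Z') then
        acc ++ [PySem.Chars.upperChar (m.getD (PySem.Chars.lowerChar c) (PySem.Chars.lowerChar c))]
      else acc ++ [c])
      = fun (acc : List Char) c => acc ++ [pvCharA m c] := by
    funext acc c
    unfold pvCharA
    split_ifs <;> rfl
  rw [hbody, PySem.List.foldl_append_singleton_eq_map]
  simp

def pvCharB (sub : PySem.Dict Char Char) (ch : Char) : Char :=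
  match sub.get? (PySem.Chars.lowerChar ch) with
  | some e => if ch = PySem.Chars.lowerChar ch then e else PySem.Chars.upperChar e
  | none => ch

theorem pvDecB_eq_map (sub : PySem.Dict Char Char) (cs : List Char) :
    pvDecB sub cs = cs.map (pvCharB sub) := by
  unfold pvDecB
  have hbody : (fun (acc : List Char) ch =>
      match sub.get? (PySem.Chars.lowerChar ch) with
      | some e => acc ++ [if ch = PySem.Chars.lowerChar ch then e else PySem.Chars.upperChar e]
      | none => acc ++ [ch])
      = fun (acc : List Char) ch => acc ++ [pvCharB sub ch] := by
    funext acc ch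
    unfold pvCharB
    cases sub.get? (PySem.Chars.lowerChar ch) <;> rfl
  rw [hbody, PySem.List.foldl_append_singleton_eq_map]
  simp

-- ---- A's frequency dict and sorted key list ----
theorem freq_eq (l : List Char) :
    pvFreqA l
      = PySem.Dict.counter (l.filter (fun c => decide ('a' ≤ c) && decide (c ≤ 'z'))) := by
  unfold pvFreqA
  rw [← PySem.Dict.foldl_insert_getD_add_one_eq_counter, List.foldl_filter]

-- (reused) insertBy through a map
theorem insertBy_map {α β : Type} (g : α → β) (cmp : β → β → Bool) (x : α) (ys : List α) :
    PySem.List.insertBy cmp (g x) (ys.map g)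
      = (PySem.List.insertBy (fun a b => cmp (g a) (g b)) x ys).map g := by
  induction ys with
  | nil => rfl
  | cons y ys ih =>
    rw [List.map_cons, PySem.List.insertBy, PySem.List.insertBy]
    by_cases hb : cmp (g x) (g y) = true
    · simp [hb]
    · simp only [Bool.not_eq_true] at hb
      simp [hb, ih]

theorem foldl_insertBy_map {α β : Type} (g : α → β) (cmp : β → β → Bool) :
    ∀ (xs acc : List α),
    (xs.map g).foldl (fun a y => PySem.List.insertBy cmp y a) (acc.map g)
      = (xs.foldl (fun a x => PySem.List.insertBy (fun u v => cmp (g u) (g v)) x a) acc).map g := by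
  intro xs
  induction xs with
  | nil => intro acc; rfl
  | cons x xs ih =>
    intro acc
    simp only [List.map_cons, List.foldl_cons]
    rw [insertBy_map g cmp x acc, ih]

theorem sorted_map_rev {α β κ : Type} [LT κ] [DecidableLT κ] (g : α → β) (key : β → κ) (xs : List α) :
    PySem.List.sorted (xs.map g) key true = (PySem.List.sorted xs (fun a => key (g a)) true).map g := by
  rw [PySem.List.sorted_rev_eq_foldl_insertBy, PySem.List.sorted_rev_eq_foldl_insertBy]
  have := foldl_insertBy_map g (fun a b => decide (key b < key a)) xs []
  simpa using this

-- common_letters = the first components of the reverse-stable sort of Counter items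
-- = the stable ascending sort of set(letters) by -count
theorem common_eq (letters : List Char) :
    (PySem.List.sorted (PySem.Dict.counter letters).items (fun x => x.2) true).map (fun e => e.1)
      = PySem.List.sorted (PySem.Set.ofList letters) (pvKey letters) false := by
  rw [PySem.Dict.items_counter]
  rw [sorted_map_rev (fun k => (k, (letters.count k : Int))) (fun x => x.2)]
  rw [List.map_map]
  have hid : ((fun e : Char × Int => e.1) ∘ (fun k => (k, (letters.count k : Int)))) = id := rfl
  rw [hid, List.map_id]
  rw [PySem.List.sorted_rev_eq_foldl_insertBy, PySem.List.sorted_eq_foldl_insertBy]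
  have hcmp : (fun (a b : Char) =>
      decide ((fun c => ((c, (letters.count c : Int)) : Char × Int).2) b
        < (fun c => ((c, (letters.count c : Int)) : Char × Int).2) a))
      = fun (a b : Char) => decide (pvKey letters a < pvKey letters b) := by
    funext a b
    simp only [pvKey]
    exact Bool.decide_congr (by omega)
  rw [hcmp]

-- ---- facts about D = set(letters) ----
theorem D_facts (l : List Char) :
    (PySem.Set.ofList (l.filter (fun c => decide ('a' ≤ c) && decide (c ≤ 'z')))).Nodup
    ∧ (∀ c ∈ PySem.Set.ofList (l.filter (fun c => decide ('a' ≤ c) && decide (c ≤ 'z'))),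
        97 ≤ c.toNat ∧ c.toNat ≤ 122)
    ∧ (PySem.Set.ofList (l.filter (fun c => decide ('a' ≤ c) && decide (c ≤ 'z')))).length ≤ 26 := by
  set D := PySem.Set.ofList (l.filter (fun c => decide ('a' ≤ c) && decide (c ≤ 'z'))) with hD
  have hnd : D.Nodup := PySem.Set.nodup_ofList _
  have hmem : ∀ c ∈ D, 97 ≤ c.toNat ∧ c.toNat ≤ 122 := by
    intro c hc
    have h1 := (PySem.Set.mem_ofList _ c).mp hc
    have h2 := (List.mem_filter.mp h1).2
    exact (lower_bool_iff c).mp h2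
  refine ⟨hnd, hmem, ?_⟩
  have hndm : (D.map Char.toNat).Nodup := hnd.map char_toNat_injective
  calc D.length = (D.map Char.toNat).length := by simp
    _ = (D.map Char.toNat).toFinset.card := (List.toFinset_card_of_nodup hndm).symm
    _ ≤ (Finset.Icc 97 122).card := by
        apply Finset.card_le_card
        intro x hx
        rw [List.mem_toFinset] at hx
        obtain ⟨c, hc, rfl⟩ := List.mem_map.mp hx
        have := hmem c hc
        rw [Finset.mem_Icc]
        omega
    _ = 26 := by rw [Nat.card_Icc]

-- rank is strictly below the number of present letters
theorem rank_lt (letters D : List Char) (c : Char) (hc : c ∈ D) :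
    pvRankB letters D c < D.length := by
  unfold pvRankB
  have hle := List.countP_le_length (p := fun d => pvKeyLtB letters d c) (l := D)
  rcases lt_or_eq_of_le hle with h | h
  · exact h
  · exfalso
    have := (List.countP_eq_length.mp h) c hc
    exact pvLt_irrefl letters c ((keyLtB_iff letters c c).mp this)

-- find? by key on a list of distinct elements
theorem find?_beq_of_mem (D : List Char) (k : Char) (hk : k ∈ D) :
    D.find? (fun c => c == k) = some k := by
  induction D with
  | nil => simp at hk
  | cons d D' ih =>
    by_cases h : d = k
    · subst h; simp
    · rw [List.find?_cons_of_neg (by simpa using h)]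
      exact ih (by rcases List.mem_cons.mp hk with rfl | h' <;> [exact absurd rfl h; exact h'])

theorem find?_beq_of_not_mem (D : List Char) (k : Char) (hk : k ∉ D) :
    D.find? (fun c => c == k) = none := by
  rw [List.find?_eq_none]
  intro c hc
  simp only [beq_iff_eq]
  intro h
  exact hk (h ▸ hc)

-- B's sub dict, characterized per key
theorem subB_get? (letters D eng : List Char) (hnd : D.Nodup)
    (hrank : ∀ c ∈ D, pvRankB letters D c < eng.length) (k : Char) :
    (pvSubB letters D eng).get? k
      = (D.find? (fun c => c == k)).map
          (fun c => (PySem.List.pyGet? eng ((pvRankB letters D c : Nat) : Int)).getD c) := by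
  unfold pvSubB
  have hbody : D.foldl
      (fun d c =>
        match PySem.List.pyGet? eng ((pvRankB letters D c : Nat) : Int) with
        | some e => d.insert c e
        | none => d)
      PySem.Dict.empty
      = (D.map (fun c => (c, (PySem.List.pyGet? eng ((pvRankB letters D c : Nat) : Int)).getD c))).foldl
          (fun d p => d.insert p.1 p.2) PySem.Dict.empty := by
    rw [List.foldl_map]
    apply PySem.List.foldl_congr_mem
    intro d c hc
    obtain ⟨e, he⟩ : ∃ e, PySem.List.pyGet? eng ((pvRankB letters D c : Nat) : Int) = some e := by
      rw [PySem.List.pyGet?_natCast]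
      exact ⟨_, List.getElem?_eq_getElem (hrank c hc)⟩
    simp only [he]
    rfl
  have hkeys : List.map Prod.fst
      (D.map (fun c => (c, (PySem.List.pyGet? eng ((pvRankB letters D c : Nat) : Int)).getD c)))
      = D := by
    rw [List.map_map]
    have hcomp : (Prod.fst ∘ fun c =>
        (c, (PySem.List.pyGet? eng ((pvRankB letters D c : Nat) : Int)).getD c)) = fun c => c := rfl
    rw [hcomp, List.map_id']
  rw [hbody, get?_foldl_insert _ _ _ (by rw [hkeys]; exact hnd)]
  rw [List.find?_map, Option.map_map]
  exact Option.or_none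

-- ---- S := sorted(set(letters), key = -count) : structure facts ----
theorem S_pairwise (letters : List Char) :
    (PySem.List.sorted (PySem.Set.ofList letters) (pvKey letters) false).Pairwise (pvLt letters) := by
  rw [PySem.List.sorted_eq_foldl_insertBy]
  apply pairwise_foldl_insertBy_stable letters (PySem.Set.ofList letters) []
  · exact ofList_pairwise_idx letters
  · intro a ha; simp at ha
  · simp

-- the index of a present letter in A's sorted list equals B's rank
theorem idx_eq_rank (letters : List Char) (c : Char)
    (hc : c ∈ PySem.Set.ofList letters) :
    (PySem.List.sorted (PySem.Set.ofList letters) (pvKey letters) false).idxOf c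
      = pvRankB letters (PySem.Set.ofList letters) c := by
  set D := PySem.Set.ofList letters with hD
  set S := PySem.List.sorted D (pvKey letters) false with hS
  have hperm : S.Perm D := PySem.List.sorted_perm _ _ _
  have hndS : S.Nodup := hperm.nodup_iff.mpr (PySem.Set.nodup_ofList _)
  have hcS : c ∈ S := hperm.mem_iff.mpr hc
  rw [idxOf_eq_countP letters S hndS (S_pairwise letters) c hcS]
  rw [hperm.countP_eq]
  rfl

-- ---- per-character agreement ----
theorem char_eq (letters : List Char) (eng : List Char)
    (hengLen : eng.length = 26)
    (hndD : (PySem.Set.ofList letters).Nodup)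
    (hmemD : ∀ c ∈ PySem.Set.ofList letters, 97 ≤ c.toNat ∧ c.toNat ≤ 122)
    (hlenD : (PySem.Set.ofList letters).length ≤ 26)
    (ch : Char) :
    pvCharA (pvMapA (PySem.List.sorted (PySem.Set.ofList letters) (pvKey letters) false) eng) ch
      = pvCharB (pvSubB letters (PySem.Set.ofList letters) eng) ch := by
  set D := PySem.Set.ofList letters with hD
  set S := PySem.List.sorted D (pvKey letters) false with hS
  have hperm : S.Perm D := PySem.List.sorted_perm _ _ _
  have hndS : S.Nodup := hperm.nodup_iff.mpr hndD
  have hlenS : S.length = D.length := hperm.length_eq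
  have hrank : ∀ c ∈ D, pvRankB letters D c < eng.length := by
    intro c hc
    have := rank_lt letters D c hc
    omega
  -- A's mapping lookups
  have hm : ∀ k, (pvMapA S eng).get? k
      = ((S.zip eng).find? (fun p => p.1 == k)).map Prod.snd := by
    intro k
    rw [pvMapA_eq_zip S eng (by omega), get?_foldl_insert _ _ _ (by
      have hz : List.map Prod.fst (S.zip eng) = S := List.map_fst_zip (by omega)
      rw [hz]
      exact hndS)]
    exact Option.or_none
  -- agreement on a present lowercase letter
  have hlook : ∀ c ∈ D, (pvMapA S eng).getD c c
      = (PySem.List.pyGet? eng ((pvRankB letters D c : Nat) : Int)).getD c := by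
    intro c hc
    have hcS : c ∈ S := hperm.mem_iff.mpr hc
    have hidx : S.idxOf c < eng.length := by
      have := List.idxOf_lt_length_of_mem hcS
      omega
    have h1 : (pvMapA S eng).get? c = eng[S.idxOf c]? := by
      rw [hm c, find?_zip_eq c S eng hndS hcS hidx]
    have h2 : PySem.List.pyGet? eng ((pvRankB letters D c : Nat) : Int)
        = eng[pvRankB letters D c]? := by
      rw [PySem.List.pyGet?_natCast]
    show ((pvMapA S eng).get? c).getD c = _
    rw [h1, h2, idx_eq_rank letters c hc]
  have hnone : ∀ k, k ∉ D → (pvMapA S eng).get? k = none := by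
    intro k hk
    rw [hm k, find?_zip_none k S eng (fun h => hk (hperm.mem_iff.mp h))]
    rfl
  have hsub := subB_get? letters D eng hndD hrank
  unfold pvCharA pvCharB
  by_cases h1 : (decide ('a' ≤ ch) && decide (ch ≤ 'z')) = true
  · have hb := (lower_bool_iff ch).mp h1
    have hcl : PySem.Chars.lowerChar ch = ch := lowerChar_eq_self (by omega)
    rw [if_pos h1, hcl]
    by_cases hc : ch ∈ D
    · rw [hsub ch, find?_beq_of_mem D ch hc]
      simp only [Option.map_some, if_true]
      exact hlook ch hc
    · rw [hsub ch, find?_beq_of_not_mem D ch hc]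
      show ((pvMapA S eng).get? ch).getD ch = ch
      rw [hnone ch hc]
      rfl
  · rw [if_neg h1]
    by_cases h2 : (decide ('A' ≤ ch) && decide (ch ≤ 'Z')) = true
    · have hb := (upper_bool_iff ch).mp h2
      have hcl := lowerChar_toNat hb.1 hb.2
      have hne : ch ≠ PySem.Chars.lowerChar ch := by
        intro h
        have := congrArg Char.toNat h
        omega
      rw [if_pos h2]
      set cl := PySem.Chars.lowerChar ch with hclDef
      by_cases hc : cl ∈ D
      · rw [hsub cl, find?_beq_of_mem D cl hc]
        simp only [Option.map_some]
        rw [if_neg hne, hlook cl hc]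
      · rw [hsub cl, find?_beq_of_not_mem D cl hc]
        show PySem.Chars.upperChar (((pvMapA S eng).get? cl).getD cl) = ch
        rw [hnone cl hc]
        show PySem.Chars.upperChar cl = ch
        apply char_toNat_injective
        rw [upperChar_toNat (by omega) (by omega)]
        omega
    · rw [if_neg h2]
      have hbl : ¬ (97 ≤ ch.toNat ∧ ch.toNat ≤ 122) := fun h => h1 ((lower_bool_iff ch).mpr h)
      have hbu : ¬ (65 ≤ ch.toNat ∧ ch.toNat ≤ 90) := fun h => h2 ((upper_bool_iff ch).mpr h)
      have hcl : PySem.Chars.lowerChar ch = ch := lowerChar_eq_self hbu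
      rw [hcl]
      have hc : ch ∉ D := fun h => hbl (hmemD ch h)
      rw [hsub ch, find?_beq_of_not_mem D ch hc]
      rfl

-- ---- the two ports agree ----
theorem pv_main (cipher : String) :
    break_substitution_cipher cipher = break_substitution_cipher_alt cipher := by
  simp only [break_substitution_cipher, break_substitution_cipher_alt]
  rw [freq_eq]
  set l := (PySem.Str.lower cipher).toList with hl
  set letters := l.filter (fun c => decide ('a' ≤ c) && decide (c ≤ 'z')) with hletters
  rw [common_eq letters]
  obtain ⟨hnd, hmem, hlen⟩ := D_facts l
  rw [pvDecA_eq_map, pvDecB_eq_map]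
  congr 1
  apply List.map_congr_left
  intro ch _
  exact char_eq letters ("eotainshrdlcufwmpygbkqvjxz".toList) (by decide)
    (by simp only [hletters]; exact hnd) (by simp only [hletters]; exact hmem)
    (by simp only [hletters]; exact hlen) ch

-- ===== VERDICT (by name: the statement is the Claim_ definition above) =====
theorem break_substitution_cipher_spec : Claim_equal_break_substitution_cipher := by
  intro cipher _
  exact pv_main cipher
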